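-- pv_equiv track=rewrite | github.com/shameekyogi68/scriptpulse-antigravity | scriptpulse/agents/segmentation.py | create_scenes
-- ===== SOURCE A (Python) =====
-- def create_scenes(parsed_lines, boundaries):
--     """
--     Create initial scene objects from boundaries.
--     """
--     scenes = []
--
--     for i in range(len(boundaries)):
--         start_line = boundaries[i][0]
--         start_confidence = boundaries[i][1]
--
--         # Determine end line
--         if i + 1 < len(boundaries):
--             end_line = boundaries[i + 1][0] - 1
--         else:
--             end_line = len(parsed_lines) - 1
--
--         scenes.append({
--             'scene_index': i,
--             'start_line': start_line,
--             'end_line': end_line,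
--             'boundary_confidence': start_confidence
--         })
--
--     return scenes
-- ===== SOURCE B (Python) =====
-- def create_scenes(parsed_lines, boundaries):
--     """Two staged passes with no lookahead: walk boundaries BACKWARDS threading
--     the next scene's start line through an accumulator (seeded with
--     len(parsed_lines)), collecting (start, end, confidence) triples; then a
--     second pass numbers the reversed triples into the scene dicts."""
--     triples_rev = []
--     nxt = len(parsed_lines)
--     for start, conf in reversed(boundaries):
--         triples_rev.append((start, nxt - 1, conf))
--         nxt = start
--     scenes = []
--     for i, (start, end, conf) in enumerate(reversed(triples_rev)):
--         scenes.append({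
--             'scene_index': i,
--             'start_line': start,
--             'end_line': end,
--             'boundary_confidence': conf,
--         })
--     return scenes
-- ===== Notes on version B (the rewrite author's own statement) =====
-- stated objective: alternative
-- what changed: Eliminates A's lookahead (boundaries[i+1]) entirely: B traverses boundaries backwards threading the next scene's start line through an accumulator seeded with len(parsed_lines), then a second pass reverses and numbers the collected triples into scene dicts.
import Mathlib
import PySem

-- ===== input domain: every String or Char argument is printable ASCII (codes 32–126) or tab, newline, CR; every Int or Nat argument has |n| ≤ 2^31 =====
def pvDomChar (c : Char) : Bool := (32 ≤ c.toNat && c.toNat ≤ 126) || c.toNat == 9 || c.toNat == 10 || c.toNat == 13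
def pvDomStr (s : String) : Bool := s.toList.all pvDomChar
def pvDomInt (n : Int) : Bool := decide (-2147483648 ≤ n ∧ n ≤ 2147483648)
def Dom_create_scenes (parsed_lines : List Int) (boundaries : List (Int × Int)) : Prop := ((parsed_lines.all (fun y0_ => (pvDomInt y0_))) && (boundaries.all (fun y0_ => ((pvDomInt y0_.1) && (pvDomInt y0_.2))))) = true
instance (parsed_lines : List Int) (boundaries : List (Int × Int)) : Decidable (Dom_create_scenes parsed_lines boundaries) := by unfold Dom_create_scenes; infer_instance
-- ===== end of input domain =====

-- ===== PORT A =====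
-- B replaces A's indexed loop with a lookahead branch by a backward traversal threading the
-- next scene's start through an accumulator, then a numbering pass (objective: alternative decomposition).
def create_scenes (parsed_lines : List Int) (boundaries : List (Int × Int)) : List (List (String × Int)) :=
  (PySem.List.pyRange 0 (boundaries.length : Int) 1).foldl (fun scenes i =>
    let b := PySem.List.pyGetD boundaries i (0, 0)
    let start_line := b.1
    let start_confidence := b.2
    let end_line :=
      if i + 1 < (boundaries.length : Int) then
        (PySem.List.pyGetD boundaries (i + 1) (0, 0)).1 - 1
      else
        (parsed_lines.length : Int) - 1
    scenes ++ [[("scene_index", i), ("start_line", start_line),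
                ("end_line", end_line), ("boundary_confidence", start_confidence)]]) []

-- ===== PORT B =====
def create_scenes_alt (parsed_lines : List Int) (boundaries : List (Int × Int)) : List (List (String × Int)) :=
  -- first pass: reversed(boundaries), accumulator (triples_rev, nxt)
  let st := boundaries.reverse.foldl
    (fun (acc : List (Int × Int × Int) × Int) b =>
      (acc.1 ++ [(b.1, acc.2 - 1, b.2)], b.1))
    ([], (parsed_lines.length : Int))
  -- second pass: enumerate(reversed(triples_rev)) into the scene dicts
  (PySem.List.enumerate st.1.reverse).foldl (fun scenes p =>
    scenes ++ [[("scene_index", p.1), ("start_line", p.2.1),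
                ("end_line", p.2.2.1), ("boundary_confidence", p.2.2.2)]]) []

-- ===== PRECONDITION & SPEC =====
def Spec_create_scenes (parsed_lines : List Int) (boundaries : List (Int × Int)) (out : List (List (String × Int))) : Prop := out = create_scenes_alt parsed_lines boundaries
instance (parsed_lines : List Int) (boundaries : List (Int × Int)) (out : List (List (String × Int))) : Decidable (Spec_create_scenes parsed_lines boundaries out) := by unfold Spec_create_scenes; infer_instance

-- ===== CLAIM (what is proved, stated in full; the proofs are below) =====
def Claim_equal_create_scenes : Prop := ∀ (parsed_lines : List Int) (boundaries : List (Int × Int)), Dom_create_scenes parsed_lines boundaries → Spec_create_scenes parsed_lines boundaries (create_scenes parsed_lines boundaries)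

-- ===== LEMMAS AND PROOFS =====

-- the row A builds for index k (proof abbreviation)
def rowA (parsed_lines : List Int) (boundaries : List (Int × Int)) (k : Nat) : List (String × Int) :=
  [("scene_index", (k : Int)), ("start_line", (PySem.List.pyGetD boundaries (k : Int) (0, 0)).1),
   ("end_line", if (k : Int) + 1 < (boundaries.length : Int) then
       (PySem.List.pyGetD boundaries ((k : Int) + 1) (0, 0)).1 - 1
     else (parsed_lines.length : Int) - 1),
   ("boundary_confidence", (PySem.List.pyGetD boundaries (k : Int) (0, 0)).2)]

lemma create_scenes_eq_map (parsed_lines : List Int) (boundaries : List (Int × Int)) :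
    create_scenes parsed_lines boundaries
      = (List.range boundaries.length).map (rowA parsed_lines boundaries) := by
  unfold create_scenes
  rw [PySem.List.pyRange_zero_natCast, List.foldl_map]
  exact PySem.List.foldl_append_singleton_eq_map
    (fun k => rowA parsed_lines boundaries k) (List.range boundaries.length) []

-- forward characterisation of B's backward pass
def headStart (bs : List (Int × Int)) (n0 : Int) : Int :=
  match bs with
  | [] => n0
  | b :: _ => b.1

def tripsF (bs : List (Int × Int)) (n0 : Int) : List (Int × Int × Int) :=
  match bs with
  | [] => []
  | b :: rest => (b.1, headStart rest n0 - 1, b.2) :: tripsF rest n0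

lemma bwd_eq (bs : List (Int × Int)) (n0 : Int) :
    bs.reverse.foldl
      (fun (acc : List (Int × Int × Int) × Int) b =>
        (acc.1 ++ [(b.1, acc.2 - 1, b.2)], b.1)) ([], n0)
      = ((tripsF bs n0).reverse, headStart bs n0) := by
  induction bs with
  | nil => rfl
  | cons b rest ih =>
    simp only [List.reverse_cons, List.foldl_append, List.foldl_cons, List.foldl_nil, ih,
      tripsF, headStart]

lemma length_tripsF (bs : List (Int × Int)) (n0 : Int) :
    (tripsF bs n0).length = bs.length := by
  induction bs with
  | nil => rfl
  | cons b rest ih => simp [tripsF, ih]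

lemma headStart_drop_lt (bs : List (Int × Int)) (n0 : Int) (j : Nat) (h : j < bs.length) :
    headStart (bs.drop j) n0 = bs[j].1 := by
  rw [List.drop_eq_getElem_cons h]; rfl

lemma headStart_drop_ge (bs : List (Int × Int)) (n0 : Int) (j : Nat) (h : bs.length ≤ j) :
    headStart (bs.drop j) n0 = n0 := by
  rw [List.drop_eq_nil_of_le h]; rfl

lemma tripsF_getElem? (bs : List (Int × Int)) (n0 : Int) (k : Nat) (hk : k < bs.length) :
    (tripsF bs n0)[k]? =
      some (bs[k].1, headStart (bs.drop (k + 1)) n0 - 1, bs[k].2) := by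
  induction bs generalizing k with
  | nil => simp at hk
  | cons b rest ih =>
    cases k with
    | zero => simp [tripsF]
    | succ k =>
      have hk' : k < rest.length := by simpa using hk
      simp only [tripsF, List.getElem?_cons_succ, ih k hk', List.getElem_cons_succ,
        List.drop_succ_cons]

-- ===== VERDICT (by name: the statement is the Claim_ definition above) =====
theorem create_scenes_spec : Claim_equal_create_scenes := by
  intro parsed_lines boundaries _
  unfold Spec_create_scenes create_scenes_alt
  rw [bwd_eq, create_scenes_eq_map]
  simp only [List.reverse_reverse]
  rw [PySem.List.foldl_append_singleton_eq_map
    (fun p => [("scene_index", p.1), ("start_line", p.2.1),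
               ("end_line", p.2.2.1), ("boundary_confidence", p.2.2.2)])
    (PySem.List.enumerate (tripsF boundaries (parsed_lines.length : Int))) []]
  simp only [List.nil_append]
  apply List.ext_getElem?
  intro k
  by_cases hk : k < boundaries.length
  · rw [List.getElem?_map, List.getElem?_map, PySem.List.getElem?_enumerate,
      List.getElem?_range hk, tripsF_getElem? boundaries _ k hk]
    have hget : PySem.List.pyGetD boundaries (k : Int) (0, 0) = boundaries[k] := by
      rw [PySem.List.pyGetD_natCast]; exact List.getD_eq_getElem _ _ hk
    by_cases hlast : k + 1 < boundaries.length
    · have hget2 : PySem.List.pyGetD boundaries ((k : Int) + 1) (0, 0) = boundaries[k + 1] := by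
        have hc : ((k : Int) + 1) = ((k + 1 : Nat) : Int) := by push_cast; ring
        rw [hc, PySem.List.pyGetD_natCast]; exact List.getD_eq_getElem _ _ hlast
      rw [headStart_drop_lt boundaries _ (k + 1) hlast]
      simp only [rowA, hget, hget2, Option.map_some]
      rw [if_pos (by omega : (k : Int) + 1 < (boundaries.length : Int))]
      simp
    · rw [headStart_drop_ge boundaries _ (k + 1) (by omega)]
      simp only [rowA, hget, Option.map_some]
      rw [if_neg (by omega : ¬ ((k : Int) + 1 < (boundaries.length : Int)))]
      simp
  · rw [List.getElem?_map, List.getElem?_map, PySem.List.getElem?_enumerate]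
    rw [List.getElem?_eq_none (by simpa using hk),
      List.getElem?_eq_none (by rw [length_tripsF]; omega)]
    rfl
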